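-- pv_equiv track=rewrite | github.com/andysouthcombe/advent-of-code-2022 | day_7.py | find_smallest_dir_to_delete
-- ===== SOURCE A (Python) =====
-- def find_smallest_dir_to_delete(folders):
--     sizes = list(folders.values())
--     root_folder_size = sizes[0]
--     total_space = 70000000
--     required_free_space = 30000000
--     current_free_space = total_space - root_folder_size
--     folders_that_meet_criteria = []
--     for size in sizes:
--         if current_free_space + size >= required_free_space:
--             folders_that_meet_criteria.append(size)
--     return min(folders_that_meet_criteria)
-- ===== SOURCE B (Python) =====
-- def find_smallest_dir_to_delete(folders):
--     sizes = list(folders.values())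
--     threshold = sizes[0] - 40000000
--     for size in sorted(sizes):
--         if size >= threshold:
--             return size
-- ===== Notes on version B (the rewrite author's own statement) =====
-- stated objective: alternative
-- what changed: Replaces the filter-then-min pass with an arithmetically simplified threshold (root - 40000000), a sort of the sizes, and a scan returning the first element at or above the threshold.
-- outside the precondition, e.g. on find_smallest_dir_to_delete({}): A raises IndexError, B raises IndexError
import Mathlib
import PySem

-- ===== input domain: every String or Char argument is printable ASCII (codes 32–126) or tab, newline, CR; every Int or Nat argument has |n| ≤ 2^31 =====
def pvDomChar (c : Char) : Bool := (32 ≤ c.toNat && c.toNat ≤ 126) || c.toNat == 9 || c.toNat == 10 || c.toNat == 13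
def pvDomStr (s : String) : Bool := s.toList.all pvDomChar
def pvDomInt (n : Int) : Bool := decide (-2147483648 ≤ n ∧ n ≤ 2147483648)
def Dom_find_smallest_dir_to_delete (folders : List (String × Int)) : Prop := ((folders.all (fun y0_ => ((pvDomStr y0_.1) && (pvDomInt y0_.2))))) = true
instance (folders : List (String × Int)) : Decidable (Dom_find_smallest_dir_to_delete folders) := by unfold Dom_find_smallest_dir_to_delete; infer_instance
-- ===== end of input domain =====

-- B changes the decomposition (sort then first-hit scan with a simplified threshold, instead of filter-then-min); objective: alternative.

-- ===== PORT A =====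
def find_smallest_dir_to_delete (folders : List (String × Int)) : Int :=
  let sizes := (PySem.Dict.ofList folders).values
  let root_folder_size := (PySem.List.pyGet? sizes 0).getD 0  -- sizes[0]; IndexError on empty dict is excluded by Pre_
  let total_space : Int := 70000000
  let required_free_space : Int := 30000000
  let current_free_space := total_space - root_folder_size
  let folders_that_meet_criteria :=
    sizes.foldl (fun acc size => if current_free_space + size ≥ required_free_space then acc ++ [size] else acc) []
  (PySem.List.min? folders_that_meet_criteria (fun x => x)).getD 0  -- min(...); the list is never empty when sizes is nonempty

-- ===== PORT B =====
-- the 'for … return' scan of Source B; the [] case is Python's fall-through (never reached: the root itself meets the threshold)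
def pvFirstGE : List Int → Int → Int
  | [], _ => 0
  | x :: rest, t => if x ≥ t then x else pvFirstGE rest t

def find_smallest_dir_to_delete_alt (folders : List (String × Int)) : Int :=
  let sizes := (PySem.Dict.ofList folders).values
  let threshold := (PySem.List.pyGet? sizes 0).getD 0 - 40000000
  pvFirstGE (PySem.List.sorted sizes (fun x => x) false) threshold

-- ===== PRECONDITION & SPEC =====
-- Pre_ excludes only the empty dict, on which A raises IndexError at sizes[0] (B raises there too).
def Pre_find_smallest_dir_to_delete (folders : List (String × Int)) : Prop := folders ≠ []
instance (folders : List (String × Int)) : Decidable (Pre_find_smallest_dir_to_delete folders) := by unfold Pre_find_smallest_dir_to_delete; infer_instance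
def pvWitness_find_smallest_dir_to_delete : (List (String × Int)) := [("/", 50000000)]

def Spec_find_smallest_dir_to_delete (folders : List (String × Int)) (out : Int) : Prop := out = find_smallest_dir_to_delete_alt folders
instance (folders : List (String × Int)) (out : Int) : Decidable (Spec_find_smallest_dir_to_delete folders out) := by unfold Spec_find_smallest_dir_to_delete; infer_instance

-- ===== CLAIM (what is proved, stated in full; the proofs are below) =====
def Claim_equal_find_smallest_dir_to_delete : Prop := ∀ (folders : List (String × Int)), Dom_find_smallest_dir_to_delete folders → Pre_find_smallest_dir_to_delete folders → Spec_find_smallest_dir_to_delete folders (find_smallest_dir_to_delete folders)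

-- ===== LEMMAS AND PROOFS =====

-- the dict built from a nonempty association list has at least one entry
theorem pv_update_items_ne_nil (l : List (String × Int)) (d : PySem.Dict String Int)
    (h : d.items ≠ []) : (d.update l).items ≠ [] := by
  induction l generalizing d with
  | nil => exact h
  | cons p rest ih =>
      have h' : (d.insert p.1 p.2).items ≠ [] :=
        List.ne_nil_of_mem (PySem.Dict.mem_items_insert_self d p.1 p.2)
      simpa [PySem.Dict.update] using ih (d.insert p.1 p.2) h'

theorem pv_values_ne_nil (folders : List (String × Int)) (h : folders ≠ []) :
    (PySem.Dict.ofList folders).values ≠ [] := by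
  obtain ⟨p, rest, rfl⟩ := List.exists_cons_of_ne_nil h
  have h1 : (PySem.Dict.ofList (p :: rest)).items ≠ [] := by
    have h0 : ((PySem.Dict.empty : PySem.Dict String Int).insert p.1 p.2).items ≠ [] :=
      List.ne_nil_of_mem (PySem.Dict.mem_items_insert_self _ p.1 p.2)
    simpa [PySem.Dict.ofList, PySem.Dict.update] using
      pv_update_items_ne_nil rest ((PySem.Dict.empty).insert p.1 p.2) h0
  simp [PySem.Dict.values]
  exact h1

-- first element ≥ t of a ≤-sorted list is a member, is ≥ t, and is ≤ every member ≥ t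
theorem pvFirstGE_spec (l : List Int) (t : Int) (hp : l.Pairwise (· ≤ ·))
    (hex : ∃ x ∈ l, t ≤ x) :
    pvFirstGE l t ∈ l ∧ t ≤ pvFirstGE l t ∧ ∀ y ∈ l, t ≤ y → pvFirstGE l t ≤ y := by
  induction l with
  | nil => simp at hex
  | cons x rest ih =>
    rcases List.pairwise_cons.mp hp with ⟨hx, hrest⟩
    by_cases hge : x ≥ t
    · refine ⟨by simp [pvFirstGE, hge], by simp [pvFirstGE, hge], ?_⟩
      intro y hy _
      simp [pvFirstGE, hge]
      rcases List.mem_cons.mp hy with rfl | hy'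
      · omega
      · exact hx y hy'
    · have hex' : ∃ z ∈ rest, t ≤ z := by
        rcases hex with ⟨z, hz, hzt⟩
        rcases List.mem_cons.mp hz with rfl | hz'
        · omega
        · exact ⟨z, hz', hzt⟩
      rcases ih hrest hex' with ⟨h1, h2, h3⟩
      refine ⟨by simp [pvFirstGE, hge]; right; exact h1, by simpa [pvFirstGE, hge] using h2, ?_⟩
      intro y hy hty
      simp only [pvFirstGE, if_neg hge]
      rcases List.mem_cons.mp hy with rfl | hy'
      · omega
      · exact h3 y hy' hty

theorem pv_main (folders : List (String × Int)) (hpre : folders ≠ []) :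
    find_smallest_dir_to_delete folders = find_smallest_dir_to_delete_alt folders := by
  obtain ⟨s0, rest, hs⟩ := List.exists_cons_of_ne_nil (pv_values_ne_nil folders hpre)
  simp only [find_smallest_dir_to_delete, find_smallest_dir_to_delete_alt]
  set sizes := (PySem.Dict.ofList folders).values with hsz
  have hget : (PySem.List.pyGet? sizes 0).getD 0 = s0 := by
    rw [hs]; simp [PySem.List.pyGet?, PySem.List.pyIdx?]
  rw [hget, PySem.List.foldl_append_ite_eq_filter]
  set t := s0 - 40000000 with ht
  set p := fun size : Int => decide (70000000 - s0 + size ≥ 30000000) with hpdef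
  have hmem_filter : ∀ z : Int, z ∈ sizes.filter p ↔ z ∈ sizes ∧ t ≤ z := by
    intro z
    rw [List.mem_filter, hpdef]
    simp only [decide_eq_true_iff, ge_iff_le]
    constructor <;> (rintro ⟨h1, h2⟩; exact ⟨h1, by omega⟩)
  have hs0mem : s0 ∈ sizes := by rw [hs]; exact List.mem_cons_self
  have hfil_ne : sizes.filter p ≠ [] :=
    List.ne_nil_of_mem ((hmem_filter s0).mpr ⟨hs0mem, by omega⟩)
  obtain ⟨a, ha⟩ : ∃ a, PySem.List.min? (sizes.filter p) (fun x => x) = some a := by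
    cases hm : PySem.List.min? (sizes.filter p) (fun x => x) with
    | none => exact absurd ((PySem.List.min?_eq_none_iff _ _).mp hm) hfil_ne
    | some a => exact ⟨a, rfl⟩
  obtain ⟨hbmem, hbt, hbmin⟩ :=
    pvFirstGE_spec (PySem.List.sorted sizes (fun x => x) false) t
      (PySem.List.sorted_pairwise sizes (fun x => x))
      ⟨s0, (PySem.List.mem_sorted sizes _ _ s0).mpr hs0mem, by omega⟩
  set b := pvFirstGE (PySem.List.sorted sizes (fun x => x) false) t with hb
  have hamem := PySem.List.min?_mem ha
  have hat : t ≤ a := ((hmem_filter a).mp hamem).2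
  have hasz : a ∈ sizes := ((hmem_filter a).mp hamem).1
  have hab : a ≤ b := by
    have hbsz : b ∈ sizes := (PySem.List.mem_sorted sizes _ _ b).mp hbmem
    exact PySem.List.min?_isMin ha b ((hmem_filter b).mpr ⟨hbsz, hbt⟩)
  have hba : b ≤ a := hbmin a ((PySem.List.mem_sorted sizes _ _ a).mpr hasz) hat
  rw [List.nil_append, ha]
  simp only [Option.getD_some]
  omega

-- ===== VERDICT (by name: the statement is the Claim_ definition above) =====
theorem find_smallest_dir_to_delete_spec : Claim_equal_find_smallest_dir_to_delete := by
  intro folders _ hpre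
  exact pv_main folders hpre
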